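-- pv_equiv track=rewrite | github.com/qaintumai/qaintum-ai | qt-container/qaintum_qt/utils/qff_config.py | find_optimal_cutoff_and_wires
-- ===== SOURCE A (Python) =====
-- def find_optimal_cutoff_and_wires(target_output_size, max_cutoff_dim=10, max_num_wires=10):
--     """
--     Finds the optimal cutoff_dim and num_wires such that cutoff_dim ** num_wires >= target_output_size,
--     while minimizing cutoff_dim ** num_wires.
--
--     Parameters:
--     - target_output_size (int): Required output size.
--     - max_cutoff_dim (int): Maximum allowed cutoff dimension.
--     - max_num_wires (int): Maximum allowed number of wires.
--
--     Returns:
--     - tuple: (optimal_cutoff_dim, optimal_num_wires)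
--     """
--     optimal_cutoff_dim = None
--     optimal_num_wires = None
--     min_hilbert_space_size = float('inf')
--
--     for cutoff_dim in range(2, max_cutoff_dim + 1):  # Start from 2 to avoid trivial cases
--         for num_wires in range(1, max_num_wires + 1):
--             hilbert_space_size = cutoff_dim ** num_wires
--             if hilbert_space_size >= target_output_size and hilbert_space_size < min_hilbert_space_size:
--                 min_hilbert_space_size = hilbert_space_size
--                 optimal_cutoff_dim = cutoff_dim
--                 optimal_num_wires = num_wires
--
--     if optimal_cutoff_dim is None or optimal_num_wires is None:
--         raise ValueError("No valid cutoff_dim and num_wires found within the given constraints.")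
--
--     return optimal_cutoff_dim, optimal_num_wires
-- ===== SOURCE B (Python) =====
-- def find_optimal_cutoff_and_wires(target_output_size, max_cutoff_dim=10, max_num_wires=10):
--     """Same result as the exhaustive grid scan, but for each cutoff_dim the minimal
--     num_wires is found directly by growing the power until it reaches the target."""
--     best = None  # (hilbert_space_size, cutoff_dim, num_wires)
--     for cutoff_dim in range(2, max_cutoff_dim + 1):
--         num_wires, size = 1, cutoff_dim
--         while size < target_output_size and num_wires < max_num_wires:
--             size *= cutoff_dim
--             num_wires += 1
--         if size >= target_output_size and num_wires <= max_num_wires and (best is None or size < best[0]):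
--             best = (size, cutoff_dim, num_wires)
--     if best is None:
--         raise ValueError("No valid cutoff_dim and num_wires found within the given constraints.")
--     return best[1], best[2]
-- ===== Notes on version B (the rewrite author's own statement) =====
-- stated objective: faster
-- what changed: Instead of scanning the full cutoff_dim x num_wires grid keeping a running minimum, B computes for each cutoff_dim the minimal sufficient num_wires directly by growing the power until it reaches the target (larger num_wires can never win since powers only grow), keeping the strictly-smallest Hilbert size across cutoffs with the same first-found tie-break.
import Mathlib
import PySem

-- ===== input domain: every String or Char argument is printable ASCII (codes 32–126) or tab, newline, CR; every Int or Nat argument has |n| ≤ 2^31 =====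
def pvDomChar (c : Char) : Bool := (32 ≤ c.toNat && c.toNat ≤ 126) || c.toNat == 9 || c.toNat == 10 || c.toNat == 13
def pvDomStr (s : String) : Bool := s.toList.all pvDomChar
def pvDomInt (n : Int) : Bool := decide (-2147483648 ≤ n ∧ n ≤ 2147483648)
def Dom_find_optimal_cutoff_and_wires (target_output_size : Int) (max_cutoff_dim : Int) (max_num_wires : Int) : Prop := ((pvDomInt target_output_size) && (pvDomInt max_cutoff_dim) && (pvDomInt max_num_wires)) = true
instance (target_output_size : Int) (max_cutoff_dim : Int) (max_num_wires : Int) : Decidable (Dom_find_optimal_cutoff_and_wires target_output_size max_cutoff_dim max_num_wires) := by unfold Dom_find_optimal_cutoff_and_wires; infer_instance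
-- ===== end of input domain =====

-- B replaces A's exhaustive cutoff×wires grid scan by, for each cutoff, growing the power once to
-- the minimal sufficient num_wires (objective: alternative/faster inner structure; return value only).

-- ===== PORT A =====
-- float('inf') sentinel ported by hand: none stands for inf, exact for the comparison 'h < min'.
def pyLtInf (h : Int) (m : Option Int) : Bool :=
  match m with
  | none => true
  | some v => decide (h < v)

-- body of A's inner 'for num_wires' loop (state: optimal_cutoff_dim, optimal_num_wires, min_hilbert_space_size)
def innerStepA (target cutoff : Int) (st : Option Int × Option Int × Option Int) (num_wires : Int) :
    Option Int × Option Int × Option Int :=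
  let h := cutoff ^ num_wires.toNat
  if target ≤ h ∧ pyLtInf h st.2.2 = true then (some cutoff, some num_wires, some h) else st

def find_optimal_cutoff_and_wires (target_output_size : Int) (max_cutoff_dim : Int) (max_num_wires : Int) : Int × Int :=
  let st := (PySem.List.pyRange 2 (max_cutoff_dim + 1) 1).foldl
    (fun st cutoff_dim =>
      (PySem.List.pyRange 1 (max_num_wires + 1) 1).foldl (innerStepA target_output_size cutoff_dim) st)
    (none, none, none)
  match st with
  | (some c, some n, _) => (c, n)
  | _ => (0, 0)        -- 'raise ValueError' branch; excluded by Pre_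

-- ===== PORT B =====
def betterThanBest (size : Int) (best : Option (Int × Int × Int)) : Bool :=
  match best with
  | none => true
  | some b => decide (size < b.1)

-- Source B's 'while size < target and num_wires < max_num_wires' loop; the fuel (max_num_wires - 1).toNat
-- only makes the recursion structural: the loop increments num_wires and stops at num_wires = max_num_wires,
-- so the guard is always false when the fuel runs out.
def growLoop (target cutoff max_num_wires : Int) : Nat → Int → Int → Int × Int
  | 0, num_wires, size => (num_wires, size)
  | fuel + 1, num_wires, size =>
    if size < target ∧ num_wires < max_num_wires then
      growLoop target cutoff max_num_wires fuel (num_wires + 1) (size * cutoff)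
    else (num_wires, size)

-- body of Source B's 'for cutoff_dim' loop (state best = None | (hilbert_space_size, cutoff_dim, num_wires))
def stepB (target max_num_wires : Int) (best : Option (Int × Int × Int)) (cutoff : Int) :
    Option (Int × Int × Int) :=
  let np := growLoop target cutoff max_num_wires (max_num_wires - 1).toNat 1 cutoff
  if target ≤ np.2 ∧ np.1 ≤ max_num_wires ∧ betterThanBest np.2 best = true then
    some (np.2, cutoff, np.1)
  else best

def find_optimal_cutoff_and_wires_alt (target_output_size : Int) (max_cutoff_dim : Int) (max_num_wires : Int) : Int × Int :=
  let best := (PySem.List.pyRange 2 (max_cutoff_dim + 1) 1).foldl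
    (stepB target_output_size max_num_wires) none
  match best with
  | some b => (b.2.1, b.2.2)
  | none => (0, 0)     -- 'raise ValueError' branch; excluded by Pre_

-- ===== PRECONDITION & SPEC =====
-- Pre_ holds exactly on the inputs where A returns (elsewhere A raises ValueError): the grid must be
-- non-empty and its largest power max_cutoff_dim ^ max_num_wires must reach the target.
def Pre_find_optimal_cutoff_and_wires (target_output_size : Int) (max_cutoff_dim : Int) (max_num_wires : Int) : Prop :=
  2 ≤ max_cutoff_dim ∧ 1 ≤ max_num_wires ∧
    target_output_size ≤ max_cutoff_dim ^ max_num_wires.toNat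
instance (target_output_size : Int) (max_cutoff_dim : Int) (max_num_wires : Int) : Decidable (Pre_find_optimal_cutoff_and_wires target_output_size max_cutoff_dim max_num_wires) := by unfold Pre_find_optimal_cutoff_and_wires; infer_instance
def pvWitness_find_optimal_cutoff_and_wires : Int × Int × Int := (100, 10, 10)
def Spec_find_optimal_cutoff_and_wires (target_output_size : Int) (max_cutoff_dim : Int) (max_num_wires : Int) (out : Int × Int) : Prop := out = find_optimal_cutoff_and_wires_alt target_output_size max_cutoff_dim max_num_wires
instance (target_output_size : Int) (max_cutoff_dim : Int) (max_num_wires : Int) (out : Int × Int) : Decidable (Spec_find_optimal_cutoff_and_wires target_output_size max_cutoff_dim max_num_wires out) := by unfold Spec_find_optimal_cutoff_and_wires; infer_instance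

-- ===== CLAIM (what is proved, stated in full; the proofs are below) =====
def Claim_equal_find_optimal_cutoff_and_wires : Prop := ∀ (target_output_size : Int) (max_cutoff_dim : Int) (max_num_wires : Int), Dom_find_optimal_cutoff_and_wires target_output_size max_cutoff_dim max_num_wires → Pre_find_optimal_cutoff_and_wires target_output_size max_cutoff_dim max_num_wires → Spec_find_optimal_cutoff_and_wires target_output_size max_cutoff_dim max_num_wires (find_optimal_cutoff_and_wires target_output_size max_cutoff_dim max_num_wires)

-- ===== LEMMAS AND PROOFS =====

-- correspondence between A's three-variable state and B's best-candidate state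
def RelAB (st : Option Int × Option Int × Option Int) (best : Option (Int × Int × Int)) : Prop :=
  (st = (none, none, none) ∧ best = none) ∨
  (∃ c n m, st = (some c, some n, some m) ∧ best = some (m, c, n))

lemma growLoop_fst_le (t c W : Int) :
    ∀ (fuel : Nat) (n p : Int), n ≤ W → (growLoop t c W fuel n p).1 ≤ W := by
  intro fuel
  induction fuel with
  | zero => intro n p h; simpa [growLoop] using h
  | succ k ih =>
    intro n p h
    simp only [growLoop]
    split
    · next hc => exact ih _ _ (by omega)
    · simpa using h

lemma pow_le_pow_succ {c : Int} (hc : 2 ≤ c) (k : Nat) : c ^ k ≤ c ^ (k + 1) := by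
  have hpos : 0 < c ^ k := pow_pos (by omega) k
  calc c ^ k = c ^ k * 1 := by ring
    _ ≤ c ^ k * c := by nlinarith
    _ = c ^ (k + 1) := by ring

lemma fold_noUpdate (t c : Int) (hc : 2 ≤ c) (W v : Int) :
    ∀ (k : Nat) (b : Int), 1 ≤ b → b + k = W + 1 → v ≤ c ^ b.toNat →
      ∀ st : Option Int × Option Int × Option Int, st.2.2 = some v →
        (PySem.List.pyRange b (W + 1) 1).foldl (innerStepA t c) st = st := by
  intro k
  induction k with
  | zero =>
    intro b hb hk hv st hst
    rw [PySem.List.pyRange_one_eq_nil (by omega)]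
    rfl
  | succ k ih =>
    intro b hb hk hv st hst
    rw [PySem.List.pyRange_one_cons (by omega)]
    have hstep : innerStepA t c st b = st := by
      simp only [innerStepA, hst, pyLtInf]
      have : ¬ (c ^ b.toNat < v) := by omega
      simp [this]
    rw [List.foldl_cons, hstep]
    have hmono : v ≤ c ^ (b + 1).toNat := by
      have hb1 : (b + 1).toNat = b.toNat + 1 := by omega
      rw [hb1]
      exact le_trans hv (pow_le_pow_succ hc _)
    exact ih (b + 1) (by omega) (by omega) hmono st hst

lemma fold_inner (t c : Int) (hc : 2 ≤ c) (W : Int) :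
    ∀ (k : Nat) (a : Int), 1 ≤ a → a + k = W →
      ∀ st : Option Int × Option Int × Option Int,
        (PySem.List.pyRange a (W + 1) 1).foldl (innerStepA t c) st
          = (let np := growLoop t c W k a (c ^ a.toNat);
             if t ≤ np.2 ∧ pyLtInf np.2 st.2.2 = true then (some c, some np.1, some np.2) else st) := by
  intro k
  induction k with
  | zero =>
    intro a ha hk st
    -- a = W : single element [W], fuel 0
    rw [PySem.List.pyRange_one_cons (by omega), PySem.List.pyRange_one_eq_nil (by omega)]
    simp only [List.foldl_cons, List.foldl_nil, growLoop, innerStepA]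
  | succ k ih =>
    intro a ha hk st
    rw [PySem.List.pyRange_one_cons (by omega)]
    rw [List.foldl_cons]
    have hpow : c ^ a.toNat * c = c ^ (a + 1).toNat := by
      have : (a + 1).toNat = a.toNat + 1 := by omega
      rw [this, pow_succ]
    by_cases h1 : c ^ a.toNat < t
    · -- loop continues: A skips num_wires = a, B multiplies once
      have hskip : innerStepA t c st a = st := by
        simp only [innerStepA]
        have : ¬ (t ≤ c ^ a.toNat) := by omega
        simp [this]
      rw [hskip]
      have hgrow : growLoop t c W (k + 1) a (c ^ a.toNat)
          = growLoop t c W k (a + 1) (c ^ (a + 1).toNat) := by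
        simp only [growLoop]
        rw [if_pos ⟨h1, by omega⟩, hpow]
      rw [hgrow]
      exact ih (a + 1) (by omega) (by omega) st
    · -- target reached at num_wires = a: loop exits, tail of A's scan never updates
      have hgrow : growLoop t c W (k + 1) a (c ^ a.toNat) = (a, c ^ a.toNat) := by
        simp only [growLoop]
        rw [if_neg (by tauto)]
      rw [hgrow]
      simp only
      by_cases h2 : pyLtInf (c ^ a.toNat) st.2.2 = true
      · have hupd : innerStepA t c st a = (some c, some a, some (c ^ a.toNat)) := by
          simp only [innerStepA]
          rw [if_pos ⟨by omega, h2⟩]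
        rw [hupd]
        rw [fold_noUpdate t c hc W (c ^ a.toNat) (k + 1) (a + 1) (by omega) (by omega)
          (by rw [show (a+1).toNat = a.toNat + 1 by omega]; exact pow_le_pow_succ hc _) _ rfl]
        rw [if_pos ⟨by omega, h2⟩]
      · -- current min is already ≤ c^a: nothing updates, before or after
        have hskip : innerStepA t c st a = st := by
          simp only [innerStepA]
          rw [if_neg (by tauto)]
        rw [hskip]
        have hv : ∃ v, st.2.2 = some v ∧ v ≤ c ^ a.toNat := by
          cases hm : st.2.2 with
          | none => exact absurd (by simp [pyLtInf, hm]) h2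
          | some v =>
            refine ⟨v, rfl, ?_⟩
            by_contra hlt
            exact h2 (by simp [pyLtInf, hm]; omega)
        obtain ⟨v, hvst, hvle⟩ := hv
        rw [fold_noUpdate t c hc W v (k + 1) (a + 1) (by omega) (by omega)
          (by rw [show (a+1).toNat = a.toNat + 1 by omega];
              exact le_trans hvle (pow_le_pow_succ hc _)) st hvst]
        rw [if_neg (by tauto)]

lemma step_rel (t W : Int) (hW : 1 ≤ W) (c : Int) (hc : 2 ≤ c)
    (st : Option Int × Option Int × Option Int) (best : Option (Int × Int × Int))
    (hR : RelAB st best) :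
    RelAB ((PySem.List.pyRange 1 (W + 1) 1).foldl (innerStepA t c) st) (stepB t W best c) := by
  have hk : (1 : Int) + (W - 1).toNat = W := by omega
  rw [fold_inner t c hc W (W - 1).toNat 1 le_rfl hk st]
  rw [show c ^ (1 : Int).toNat = c from by norm_num]
  simp only [stepB]
  set np := growLoop t c W (W - 1).toNat 1 c with hnp
  have hle : np.1 ≤ W := growLoop_fst_le t c W _ 1 _ hW
  rcases hR with ⟨hA, hB⟩ | ⟨c', n', m', hA, hB⟩
  · subst hA; subst hB
    by_cases ht : t ≤ np.2
    · rw [if_pos ⟨ht, by simp only [pyLtInf]⟩, if_pos ⟨ht, hle, by simp only [betterThanBest]⟩]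
      exact Or.inr ⟨c, _, _, rfl, rfl⟩
    · rw [if_neg (by tauto), if_neg (by tauto)]
      exact Or.inl ⟨rfl, rfl⟩
  · subst hA; subst hB
    by_cases ht : t ≤ np.2
    · by_cases hlt : np.2 < m'
      · rw [if_pos ⟨ht, by simp only [pyLtInf]; exact decide_eq_true hlt⟩,
            if_pos ⟨ht, hle, by simp only [betterThanBest]; exact decide_eq_true hlt⟩]
        exact Or.inr ⟨c, _, _, rfl, rfl⟩
      · rw [if_neg (by simp only [pyLtInf, decide_eq_true_eq]; tauto),
            if_neg (by simp only [betterThanBest, decide_eq_true_eq]; tauto)]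
        exact Or.inr ⟨c', n', m', rfl, rfl⟩
    · rw [if_neg (by tauto), if_neg (by tauto)]
      exact Or.inr ⟨c', n', m', rfl, rfl⟩

lemma fold_rel (t W : Int) (hW : 1 ≤ W) :
    ∀ (l : List Int), (∀ c ∈ l, 2 ≤ c) →
      ∀ (st : Option Int × Option Int × Option Int) (best : Option (Int × Int × Int)),
        RelAB st best →
        RelAB (l.foldl (fun st c => (PySem.List.pyRange 1 (W + 1) 1).foldl (innerStepA t c) st) st)
              (l.foldl (stepB t W) best) := by
  intro l
  induction l with
  | nil => intro _ st best hR; simpa using hR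
  | cons c l ih =>
    intro hmem st best hR
    simp only [List.foldl_cons]
    exact ih (fun x hx => hmem x (List.mem_cons_of_mem _ hx)) _ _
      (step_rel t W hW c (hmem c (List.mem_cons_self)) st best hR)

-- ===== VERDICT (by name: the statement is the Claim_ definition above) =====
theorem find_optimal_cutoff_and_wires_spec : Claim_equal_find_optimal_cutoff_and_wires := by
  intro t maxC maxW _hDom hPre
  obtain ⟨hc, hw, _⟩ := hPre
  unfold Spec_find_optimal_cutoff_and_wires
  unfold find_optimal_cutoff_and_wires find_optimal_cutoff_and_wires_alt
  have hmem : ∀ c ∈ PySem.List.pyRange 2 (maxC + 1) 1, 2 ≤ c := by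
    intro c hcm
    exact (PySem.List.mem_pyRange_one.1 hcm).1
  have hR := fold_rel t maxW hw (PySem.List.pyRange 2 (maxC + 1) 1) hmem
    (none, none, none) none (Or.inl ⟨rfl, rfl⟩)
  rcases hR with ⟨hA, hB⟩ | ⟨c', n', m', hA, hB⟩ <;> simp [hA, hB]
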